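-- pv_equiv track=rewrite | github.com/kny8493/2025ds | algorithm.py | analyze_consecutive_teaching
-- ===== SOURCE A (Python) =====
-- def analyze_consecutive_teaching(teacher_schedule):
--     """
--     교사별 연속 수업 시간 분석
--
--     Args:
--         teacher_schedule: 교사 일정
--
--     Returns:
--         교사별 최대 연속 수업 시간 딕셔너리
--     """
--     result = {}
--
--     for teacher, schedule in teacher_schedule.items():
--         max_consecutive = 0  # 교사의 최대 연속 수업 시간
--
--         for day in schedule:
--             # 연속 수업 시간 계산
--             consecutive = 0
--             max_consecutive_today = 0
--
--             for period_value in schedule[day]: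
--                 if period_value:  # 수업이 있으면
--                     consecutive += 1
--                     max_consecutive_today = max(max_consecutive_today, consecutive)
--                 else:  # 수업이 없으면
--                     consecutive = 0  # 연속 카운트 초기화
--
--             # 최대 연속 수업 시간 갱신
--             max_consecutive = max(max_consecutive, max_consecutive_today)
--
--         # 결과 저장
--         result[teacher] = max_consecutive
--
--     return result
-- ===== SOURCE B (Python) =====
-- def analyze_consecutive_teaching(teacher_schedule):
--     def longest_run(periods):
--         # split at the first free period: the answer is the leading run or the best of the rest
--         if False in periods:
--             gap = periods.index(False)
--             return max(gap, longest_run(periods[gap + 1:]))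
--         return len(periods)
--
--     return {teacher: max((longest_run(schedule[day]) for day in schedule), default=0)
--             for teacher, schedule in teacher_schedule.items()}
-- ===== Notes on version B (the rewrite author's own statement) =====
-- stated objective: alternative
-- what changed: A scans each day with a running counter and two max accumulators; B instead recursively splits each day at the first free period (list.index) and takes the max of the leading run and the rest, combining days with max(..., default=0) in a dict comprehension.
import Mathlib
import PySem

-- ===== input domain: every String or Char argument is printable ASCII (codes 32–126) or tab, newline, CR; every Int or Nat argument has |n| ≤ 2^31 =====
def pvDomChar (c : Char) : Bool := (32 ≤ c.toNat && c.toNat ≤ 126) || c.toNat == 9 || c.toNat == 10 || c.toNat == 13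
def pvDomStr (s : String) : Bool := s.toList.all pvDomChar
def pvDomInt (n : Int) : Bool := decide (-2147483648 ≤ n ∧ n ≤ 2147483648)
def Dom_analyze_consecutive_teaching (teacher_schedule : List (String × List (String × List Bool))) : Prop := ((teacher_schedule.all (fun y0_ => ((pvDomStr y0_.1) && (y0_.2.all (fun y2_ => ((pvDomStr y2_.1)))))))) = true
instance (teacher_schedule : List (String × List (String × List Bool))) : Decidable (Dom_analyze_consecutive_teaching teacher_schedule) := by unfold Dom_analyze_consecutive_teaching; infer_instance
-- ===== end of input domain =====

-- B finds each day's longest run by recursing on the first free period (split-at-gap) instead of A's running-counter scan; objective: alternative, same cost.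

-- ===== PORT A =====
-- the body of A's inner per-period loop: state = (consecutive, max_consecutive_today)
def pvStep (s : Int × Int) (period_value : Bool) : Int × Int :=
  if period_value then (s.1 + 1, max s.2 (s.1 + 1)) else (0, s.2)

def analyze_consecutive_teaching (teacher_schedule : List (String × List (String × List Bool))) : List (String × Int) :=
  (teacher_schedule.foldl (fun result ts =>
    let teacher := ts.1
    let schedule := ts.2
    -- for day in schedule: ... schedule[day] (key lookup, exactly as A does)
    let max_consecutive : Int := schedule.foldl (fun max_consecutive day =>
        let st := (PySem.Dict.getD ⟨schedule⟩ day.1 []).foldl pvStep (0, 0)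
        max max_consecutive st.2) 0
    PySem.Dict.insert result teacher max_consecutive) (PySem.Dict.mk [])).items

-- ===== PORT B =====
-- longest_run from Source B: split at the first False, recurse on the tail
def pvLongestRun (periods : List Bool) : Int :=
  if h : false ∈ periods then
    let gap := (PySem.List.index? periods false).getD 0       -- periods.index(False); some, since false ∈ periods
    max (gap : Int) (pvLongestRun (PySem.List.slice periods (some ((gap : Int) + 1)) none))
  else
    PySem.List.len periods
termination_by periods.length
decreasing_by
  rw [PySem.List.slice_from periods (by positivity)]
  have hne : periods ≠ [] := List.ne_nil_of_mem h
  have hlen : 0 < periods.length := List.length_pos_of_ne_nil hne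
  simp only [List.length_drop]
  omega

def analyze_consecutive_teaching_alt (teacher_schedule : List (String × List (String × List Bool))) : List (String × Int) :=
  (teacher_schedule.foldl (fun result ts =>
    PySem.Dict.insert result ts.1
      (PySem.List.maxD (ts.2.map (fun day => pvLongestRun (PySem.Dict.getD ⟨ts.2⟩ day.1 []))) (fun v => v) 0))
    (PySem.Dict.mk [])).items

-- ===== PRECONDITION & SPEC =====
def Spec_analyze_consecutive_teaching (teacher_schedule : List (String × List (String × List Bool))) (out : List (String × Int)) : Prop := out = analyze_consecutive_teaching_alt teacher_schedule
instance (teacher_schedule : List (String × List (String × List Bool))) (out : List (String × Int)) : Decidable (Spec_analyze_consecutive_teaching teacher_schedule out) := by unfold Spec_analyze_consecutive_teaching; infer_instance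

-- ===== CLAIM (what is proved, stated in full; the proofs are below) =====
def Claim_equal_analyze_consecutive_teaching : Prop := ∀ (teacher_schedule : List (String × List (String × List Bool))), Dom_analyze_consecutive_teaching teacher_schedule → Spec_analyze_consecutive_teaching teacher_schedule (analyze_consecutive_teaching teacher_schedule)

-- ===== LEMMAS AND PROOFS =====

-- generalized value of A's inner scan: pvGAux c ps = best run, with a run of length c open on the left
def pvGAux (c : Int) : List Bool → Int
  | [] => 0
  | p :: tl => if p then max (c + 1) (pvGAux (c + 1) tl) else pvGAux 0 tl

theorem pvFoldl_step (ps : List Bool) : ∀ c m : Int, 0 ≤ m →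
    (List.foldl pvStep (c, m) ps).2 = max m (pvGAux c ps) := by
  induction ps with
  | nil =>
    intro c m hm
    simp only [List.foldl_nil, pvGAux]
    exact (max_eq_left hm).symm
  | cons p tl ih =>
    intro c m hm
    cases p
    · simp only [List.foldl_cons, pvStep, pvGAux, Bool.false_eq_true, if_false]
      exact ih 0 m hm
    · simp only [List.foldl_cons, pvStep, if_true, pvGAux]
      rw [ih (c + 1) (max m (c + 1)) (le_max_of_le_left hm), max_assoc]

theorem pvGAux_all_true (ps : List Bool) : ∀ c : Int, 0 ≤ c → false ∉ ps →
    pvGAux c ps = if ps = [] then 0 else c + ps.length := by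
  induction ps with
  | nil => intro c _ _; simp [pvGAux]
  | cons p tl ih =>
    intro c hc hmem
    have hp : p = true := by
      cases p
      · exact absurd List.mem_cons_self hmem
      · rfl
    have htl : false ∉ tl := fun h => hmem (List.mem_cons_of_mem _ h)
    subst hp
    simp only [pvGAux, if_true]
    rw [ih (c + 1) (by omega) htl]
    by_cases h : tl = []
    · subst h
      simp only [List.length_cons, List.length_nil]
      rw [max_eq_left (by omega)]
      push_cast; ring
    · have h1 : (0 : Int) < tl.length := by exact_mod_cast List.length_pos_of_ne_nil h
      rw [if_neg h, if_neg (by simp), List.length_cons]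
      rw [max_eq_right (by omega)]
      push_cast; ring

theorem pvGAux_split (t : List Bool) : ∀ (r : List Bool) (c : Int), 0 ≤ c → false ∉ t →
    pvGAux c (t ++ false :: r) =
      if t = [] then pvGAux 0 r else max (c + t.length) (pvGAux 0 r) := by
  induction t with
  | nil => intro r c _ _; simp [pvGAux]
  | cons p t' ih =>
    intro r c hc hmem
    have hp : p = true := by
      cases p
      · exact absurd List.mem_cons_self hmem
      · rfl
    have ht' : false ∉ t' := fun h => hmem (List.mem_cons_of_mem _ h)
    subst hp
    simp only [List.cons_append, pvGAux, if_true]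
    rw [ih r (c + 1) (by omega) ht']
    by_cases h : t' = []
    · subst h
      simp
    · have h1 : (0 : Int) < t'.length := by exact_mod_cast List.length_pos_of_ne_nil h
      rw [if_neg h, if_neg (by simp), List.length_cons, ← max_assoc]
      have hmx : max (c + 1) (c + 1 + (t'.length : Int)) = c + 1 + t'.length :=
        max_eq_right (by omega)
      rw [hmx]
      congr 1
      push_cast; ring

theorem pvLongestRun_nonneg (ps : List Bool) : 0 ≤ pvLongestRun ps := by
  rw [pvLongestRun]
  split
  · exact le_trans (Int.natCast_nonneg _) (le_max_left _ _)
  · simp [PySem.List.len_eq]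

theorem pvIndex_split (t r : List Bool) (h : false ∉ t) :
    PySem.List.index? (t ++ false :: r) false = some t.length := by
  induction t with
  | nil => simp [PySem.List.index?, List.idxOf?, List.findIdx?_cons]
  | cons p t' ih =>
    have hp : p = true := by
      cases p
      · exact absurd List.mem_cons_self h
      · rfl
    have ht' : false ∉ t' := fun hm => h (List.mem_cons_of_mem _ hm)
    subst hp
    have hrec := ih ht'
    have hpred : (fun x : Bool => x == false) = (fun x : Bool => !x) := by
      funext x; cases x <;> rfl
    simp only [PySem.List.index?, List.idxOf?, hpred] at hrec ⊢
    rw [List.cons_append, List.findIdx?_cons]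
    simp [hrec]

theorem pvLongestRun_split (t r : List Bool) (h : false ∉ t) :
    pvLongestRun (t ++ false :: r) = max (t.length : Int) (pvLongestRun r) := by
  rw [pvLongestRun]
  have hmem : false ∈ t ++ false :: r := by simp
  rw [dif_pos hmem, pvIndex_split t r h]
  simp only [Option.getD_some]
  congr 1
  rw [PySem.List.slice_from _ (by positivity)]
  have hto : ((t.length : Int) + 1).toNat = t.length + 1 := by omega
  rw [hto]
  have hsplit : t ++ false :: r = (t ++ [false]) ++ r := by simp
  rw [hsplit, List.drop_left' (by simp)]

theorem pvExists_split (ps : List Bool) (h : false ∈ ps) :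
    ∃ t r, ps = t ++ false :: r ∧ false ∉ t := by
  induction ps with
  | nil => cases h
  | cons p tl ih =>
    cases p
    · exact ⟨[], tl, rfl, by simp⟩
    · have htl : false ∈ tl := by
        rcases List.mem_cons.mp h with h1 | h1
        · cases h1
        · exact h1
      obtain ⟨t, r, heq, hnm⟩ := ih htl
      exact ⟨true :: t, r, by simp [heq], by simp [hnm]⟩

theorem pvDay_eq (ps : List Bool) : pvGAux 0 ps = pvLongestRun ps := by
  generalize hn : ps.length = n
  induction n using Nat.strong_induction_on generalizing ps with
  | _ n ih =>
    by_cases h : false ∈ ps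
    · obtain ⟨t, r, heq, hnm⟩ := pvExists_split ps h
      subst heq
      rw [pvGAux_split t r 0 le_rfl hnm, pvLongestRun_split t r hnm]
      have hr : pvGAux 0 r = pvLongestRun r := by
        refine ih r.length ?_ r rfl
        subst hn; simp; omega
      by_cases ht : t = []
      · subst ht
        simp [hr, max_eq_right (pvLongestRun_nonneg r)]
      · simp [ht, hr]
    · rw [pvGAux_all_true ps 0 le_rfl h, pvLongestRun, dif_neg h]
      by_cases he : ps = []
      · subst he; simp [PySem.List.len_eq]
      · simp [he, PySem.List.len_eq]

-- A's scan over one day equals B's longest_run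
theorem pvScan_eq (ps : List Bool) : (List.foldl pvStep (0, 0) ps).2 = pvLongestRun ps := by
  rw [pvFoldl_step ps 0 0 le_rfl, pvDay_eq, max_eq_right (pvLongestRun_nonneg ps)]

theorem pvMaxAux (tl : List Int) : ∀ x : Int,
    PySem.List.max? (x :: tl) (fun v => v) = some (List.foldl max x tl) := by
  induction tl with
  | nil => intro x; rfl
  | cons y tl' ih =>
    intro x
    have e1 : PySem.List.max? (x :: y :: tl') (fun v => v)
        = PySem.List.max? (max x y :: tl') (fun v => v) := by
      simp only [PySem.List.max?, List.foldl_cons]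
      congr 1
      show (if x < y then some y else some x) = some (max x y)
      by_cases h : x < y
      · rw [if_pos h, max_eq_right h.le]
      · rw [if_neg h, max_eq_left (not_lt.mp h)]
    rw [e1, ih (max x y), List.foldl_cons]

-- Python's max(..., default=0) over nonnegative values is the foldl-max from 0
theorem pvMaxD_eq_foldl (l : List Int) (hl : ∀ x ∈ l, 0 ≤ x) :
    PySem.List.maxD l (fun v => v) 0 = List.foldl max 0 l := by
  cases l with
  | nil => rfl
  | cons x tl =>
    have hx : 0 ≤ x := hl x List.mem_cons_self
    simp only [PySem.List.maxD]
    rw [pvMaxAux tl x]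
    simp only [Option.getD_some, List.foldl_cons, max_eq_right hx]

-- one teacher's value: A's day fold = B's maxD over the mapped days
theorem pvVal_eq (d : PySem.Dict String (List Bool)) (sched : List (String × List Bool)) :
    sched.foldl (fun mc day => max mc ((PySem.Dict.getD d day.1 []).foldl pvStep (0, 0)).2) 0
      = PySem.List.maxD (sched.map (fun day => pvLongestRun (PySem.Dict.getD d day.1 []))) (fun v => v) 0 := by
  rw [pvMaxD_eq_foldl _ (by
    intro x hx
    obtain ⟨day, -, rfl⟩ := List.mem_map.mp hx
    exact pvLongestRun_nonneg _)]
  rw [List.foldl_map]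
  have hfun : (fun (mc : Int) (day : String × List Bool) =>
        max mc ((PySem.Dict.getD d day.1 []).foldl pvStep (0, 0)).2)
      = (fun mc day => max mc (pvLongestRun (PySem.Dict.getD d day.1 []))) := by
    funext mc day
    rw [pvScan_eq]
  rw [hfun]

theorem pvFold_eq (l : List (String × List (String × List Bool))) :
    ∀ acc : PySem.Dict String Int,
    l.foldl (fun result ts =>
      PySem.Dict.insert result ts.1
        (ts.2.foldl (fun mc day => max mc ((PySem.Dict.getD ⟨ts.2⟩ day.1 []).foldl pvStep (0, 0)).2) 0)) acc
      = l.foldl (fun result ts =>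
        PySem.Dict.insert result ts.1
          (PySem.List.maxD (ts.2.map (fun day => pvLongestRun (PySem.Dict.getD ⟨ts.2⟩ day.1 []))) (fun v => v) 0)) acc := by
  induction l with
  | nil => intro acc; rfl
  | cons hd tl ih =>
    intro acc
    simp only [List.foldl_cons]
    rw [pvVal_eq ⟨hd.2⟩ hd.2]
    exact ih _

-- ===== VERDICT (by name: the statement is the Claim_ definition above) =====
theorem analyze_consecutive_teaching_spec : Claim_equal_analyze_consecutive_teaching := by
  intro ts _
  unfold Spec_analyze_consecutive_teaching analyze_consecutive_teaching analyze_consecutive_teaching_alt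
  exact congrArg PySem.Dict.items (pvFold_eq ts (PySem.Dict.mk []))
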